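-- pv_equiv track=rewrite | github.com/yundaehyuck/Python_Algorithm_Note | theory_source_code/01bfs/01BFS_basic.py | zero_one_bfs
-- ===== SOURCE A (Python) =====
-- from collections import deque
--
-- def zero_one_bfs(x,k):
--
--     queue = deque([x])
--
--     dist = [10000000000000000000000000000000000000]*(100001)
--
--     dist[x] = 0
--
--     while queue:
--
--         x = queue.popleft()
--
--         if x == k:
--
--             return dist[k]
--
--         for i in [1,-1,2]:
--
--             if i == 1 or i == -1:
--
--                 if x+i >= 0 and x+i <= 100000:
--
--                     if dist[x+i] > dist[x] + 1:
--
--                         dist[x+i] = dist[x]+1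
--                         queue.append((x+i))
--
--             else:
--
--                 if 2*x >= 0 and 2*x <= 100000:
--
--                     if dist[2*x] > dist[x]:
--
--                         dist[2*x] = dist[x]
--                         queue.appendleft((2*x))
-- ===== SOURCE B (Python) =====
-- def zero_one_bfs(x, k):
--     # Dial's algorithm (bucket priority queue) on the same graph:
--     # moves v->v+1 / v->v-1 cost 1 and v->2*v cost 0, nodes 0..100000.
--     dist = [10000000000000000000000000000000000000] * 100001
--     dist[x] = 0
--     buckets = [[] for _ in range(100002)]
--     buckets[0].append(x)
--     for d in range(100002):
--         bucket = buckets[d]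
--         while bucket:
--             u = bucket.pop()
--             if dist[u] < d:
--                 continue
--             if u == k:
--                 return d
--             if u + 1 <= 100000 and dist[u + 1] > d + 1:
--                 dist[u + 1] = d + 1
--                 buckets[d + 1].append(u + 1)
--             if u - 1 >= 0 and dist[u - 1] > d + 1:
--                 dist[u - 1] = d + 1
--                 buckets[d + 1].append(u - 1)
--             if 2 * u <= 100000 and dist[2 * u] > d:
--                 dist[2 * u] = d
--                 buckets[d].append(2 * u)
--     return None
-- ===== Notes on version B (the rewrite author's own statement) =====
-- stated objective: alternative
-- what changed: The deque-based 0-1 BFS is replaced by Dial's algorithm: a bucket priority queue indexed by tentative distance, scanned in increasing order (bucket entries whose stored distance has since improved are skipped); Pre_ restricts to the distance table's index range 0..100000, outside which A raises IndexError, returns None, or resolves negative arguments through Python's negative-index rule (B indexes the same fixed-size table there).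
-- outside the precondition, e.g. on zero_one_bfs(-1, 5): A returns 3, B raises IndexError; on zero_one_bfs(-5, -5): A returns 0, B returns 0; on zero_one_bfs(5, 200000): A returns None, B returns None
import Mathlib
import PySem

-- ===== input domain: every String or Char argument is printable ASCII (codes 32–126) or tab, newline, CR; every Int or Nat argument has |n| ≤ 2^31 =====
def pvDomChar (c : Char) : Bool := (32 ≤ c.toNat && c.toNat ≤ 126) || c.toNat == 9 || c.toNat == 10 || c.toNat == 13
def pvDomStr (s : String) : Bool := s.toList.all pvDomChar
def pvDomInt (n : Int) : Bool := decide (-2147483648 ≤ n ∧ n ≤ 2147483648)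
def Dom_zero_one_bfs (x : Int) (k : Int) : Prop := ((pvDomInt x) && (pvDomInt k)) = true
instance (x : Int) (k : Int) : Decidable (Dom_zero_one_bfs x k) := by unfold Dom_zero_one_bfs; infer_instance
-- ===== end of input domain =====

-- ===== PORT A =====
-- B replaces A's deque-based 0-1 BFS by Dial's algorithm (a bucket priority queue indexed
-- by tentative distance, scanned in increasing order, with stale entries skipped); both
-- return the same exact shortest-path value, proved for 0 <= x,k <= 100000 (Pre_).

def pvInit : Int := 10000000000000000000000000000000000000
def pvFuel : Nat := 10000000000000000000000000000000000000000000000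

-- Python deque via a front list and a reversed back list; popleft:
def pvPop (f b : List Int) : Option (Int × List Int × List Int) :=
  match f with
  | u :: f' => some (u, f', b)
  | [] =>
    match b.reverse with
    | u :: f' => some (u, f', [])
    | [] => none

-- A's while loop; `b` is the deque's back, stored reversed (append = cons onto b)
def pvALoop (k : Int) : Nat → List Int → List Int → Array Int → Int
  | 0, _, _, _ => 0
  | fuel+1, f, b, dist =>
    match pvPop f b with
    | none => 0    -- Python: queue exhausted, falls off the loop (returns None; outside Pre_)
    | some (u, f, b) =>
      if u = k then dist.getD k.toNat 0
      else
        -- for i in [1,-1,2]: i = 1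
        let (dist, f, b) :=
          if 0 ≤ u+1 ∧ u+1 ≤ 100000 ∧ dist.getD (u+1).toNat 0 > dist.getD u.toNat 0 + 1 then
            (dist.setIfInBounds (u+1).toNat (dist.getD u.toNat 0 + 1), f, (u+1) :: b)
          else (dist, f, b)
        -- i = -1
        let (dist, f, b) :=
          if 0 ≤ u-1 ∧ u-1 ≤ 100000 ∧ dist.getD (u-1).toNat 0 > dist.getD u.toNat 0 + 1 then
            (dist.setIfInBounds (u-1).toNat (dist.getD u.toNat 0 + 1), f, (u-1) :: b)
          else (dist, f, b)
        -- i = 2 (appendleft)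
        let (dist, f, b) :=
          if 0 ≤ 2*u ∧ 2*u ≤ 100000 ∧ dist.getD (2*u).toNat 0 > dist.getD u.toNat 0 then
            (dist.setIfInBounds (2*u).toNat (dist.getD u.toNat 0), (2*u) :: f, b)
          else (dist, f, b)
        pvALoop k fuel f b dist

def zero_one_bfs (x : Int) (k : Int) : Int :=
  pvALoop k pvFuel [x] [] ((Array.replicate 100001 pvInit).setIfInBounds x.toNat 0)

-- ===== PORT B =====
-- Source B: Dial's algorithm; buckets[d] is a Python list used as a stack (append/pop at the
-- same end), transliterated as a Lean list with cons/head.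
def pvBInner (k : Int) (d : Nat) : Nat → Array Int → Array (List Int) → Option Int × Array Int × Array (List Int)
  | 0, dist, buckets => (some 0, dist, buckets)   -- fuel exhaustion (never reached)
  | fuel+1, dist, buckets =>
    match buckets.getD d [] with
    | [] => (none, dist, buckets)
    | u :: rest =>
      let buckets := buckets.setIfInBounds d rest
      if dist.getD u.toNat 0 < (d : Int) then pvBInner k d fuel dist buckets
      else if u = k then (some (d : Int), dist, buckets)
      else
        let (dist, buckets) :=
          if u + 1 ≤ 100000 ∧ dist.getD (u+1).toNat 0 > (d : Int) + 1 then
            (dist.setIfInBounds (u+1).toNat ((d : Int) + 1),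
             buckets.setIfInBounds (d+1) ((u+1) :: buckets.getD (d+1) []))
          else (dist, buckets)
        let (dist, buckets) :=
          if 0 ≤ u - 1 ∧ dist.getD (u-1).toNat 0 > (d : Int) + 1 then
            (dist.setIfInBounds (u-1).toNat ((d : Int) + 1),
             buckets.setIfInBounds (d+1) ((u-1) :: buckets.getD (d+1) []))
          else (dist, buckets)
        let (dist, buckets) :=
          if 2*u ≤ 100000 ∧ dist.getD (2*u).toNat 0 > (d : Int) then
            (dist.setIfInBounds (2*u).toNat (d : Int),
             buckets.setIfInBounds d ((2*u) :: buckets.getD d []))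
          else (dist, buckets)
        pvBInner k d fuel dist buckets

def pvBOuter (k : Int) : Nat → Nat → Array Int → Array (List Int) → Int
  | 0, _, _, _ => 0        -- range(100002) exhausted: Python returns None (outside Pre_)
  | steps+1, d, dist, buckets =>
    match pvBInner k d pvFuel dist buckets with
    | (some r, _, _) => r
    | (none, dist, buckets) => pvBOuter k steps (d+1) dist buckets

def zero_one_bfs_alt (x : Int) (k : Int) : Int :=
  pvBOuter k 100002 0
    ((Array.replicate 100001 pvInit).setIfInBounds x.toNat 0)
    ((Array.replicate 100002 ([] : List Int)).setIfInBounds 0 [x])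

-- ===== PRECONDITION & SPEC =====
-- Pre_ restricts to the index range 0..100000 of the fixed-size distance table: outside it A
-- raises IndexError (large x), or falls off the loop and returns None (out-of-range k, not an
-- Int), or resolves negative arguments through Python's negative-index rule into the same
-- table (B indexes the same table there), which a typed port cannot reproduce.
def Pre_zero_one_bfs (x : Int) (k : Int) : Prop := 0 ≤ x ∧ x ≤ 100000 ∧ 0 ≤ k ∧ k ≤ 100000
instance (x : Int) (k : Int) : Decidable (Pre_zero_one_bfs x k) := by unfold Pre_zero_one_bfs; infer_instance
def pvWitness_zero_one_bfs : Int × Int := (3, 10)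
def Spec_zero_one_bfs (x : Int) (k : Int) (out : Int) : Prop := out = zero_one_bfs_alt x k
instance (x : Int) (k : Int) (out : Int) : Decidable (Spec_zero_one_bfs x k out) := by unfold Spec_zero_one_bfs; infer_instance

-- ===== CLAIM (what is proved, stated in full; the proofs are below) =====
def Claim_equal_zero_one_bfs : Prop := ∀ (x : Int) (k : Int), Dom_zero_one_bfs x k → Pre_zero_one_bfs x k → Spec_zero_one_bfs x k (zero_one_bfs x k)

-- ===== LEMMAS AND PROOFS =====
-- ===== shared graph / shortest-distance infrastructure =====
def pvValid (v : Int) : Prop := 0 ≤ v ∧ v ≤ 100000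

def pvEdge (u v : Int) (w : Nat) : Prop :=
  pvValid u ∧ pvValid v ∧ ((w = 1 ∧ (v = u + 1 ∨ v = u - 1)) ∨ (w = 0 ∧ v = 2 * u))

inductive pvWalk (x : Int) : Int → Nat → Prop
  | refl : pvWalk x x 0
  | step {u v : Int} {n w : Nat} : pvWalk x u n → pvEdge u v w → pvWalk x v (n + w)

noncomputable def pvδ (x v : Int) : Nat := sInf {n | pvWalk x v n}

lemma pvWalk_chain (x : Int) (hx : pvValid x) :
    ∀ m : Nat, ∀ v : Int, pvValid v → (v - x).natAbs = m → pvWalk x v m := by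
  intro m
  induction m with
  | zero =>
    intro v hv h
    have hvx : v = x := by omega
    rw [hvx]; exact pvWalk.refl
  | succ m ih =>
    intro v hv h
    rcases lt_or_gt_of_ne (show v ≠ x by omega) with hlt | hgt
    · have hv1 : pvValid (v + 1) := by unfold pvValid at *; omega
      have hw : pvWalk x (v + 1) m := ih _ hv1 (by omega)
      have : pvWalk x v (m + 1) := hw.step ⟨hv1, hv, Or.inl ⟨rfl, Or.inr (by ring)⟩⟩
      exact this
    · have hv1 : pvValid (v - 1) := by unfold pvValid at *; omega
      have hw : pvWalk x (v - 1) m := ih _ hv1 (by omega)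
      exact hw.step ⟨hv1, hv, Or.inl ⟨rfl, Or.inl (by ring)⟩⟩

lemma pvWalk_exists (x v : Int) (hx : pvValid x) (hv : pvValid v) :
    pvWalk x v ((v - x).natAbs) := pvWalk_chain x hx _ v hv rfl

lemma pvδ_le_of_walk {x v : Int} {n : Nat} (h : pvWalk x v n) : pvδ x v ≤ n :=
  Nat.sInf_le h

lemma pvWalk_δ {x v : Int} (hx : pvValid x) (hv : pvValid v) : pvWalk x v (pvδ x v) :=
  Nat.sInf_mem ⟨_, pvWalk_exists x v hx hv⟩

lemma pvδ_self (x : Int) : pvδ x x = 0 :=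
  Nat.le_zero.mp (pvδ_le_of_walk pvWalk.refl)

lemma pvδ_bound {x v : Int} (hx : pvValid x) (hv : pvValid v) : pvδ x v ≤ 100000 := by
  have := pvδ_le_of_walk (pvWalk_exists x v hx hv)
  unfold pvValid at hx hv; omega

lemma pvδ_edge_le {x u v : Int} {w : Nat} (hx : pvValid x) (e : pvEdge u v w) :
    pvδ x v ≤ pvδ x u + w :=
  pvδ_le_of_walk ((pvWalk_δ hx e.1).step e)

-- the frontier lemma: while an (unsettled, reachable) u exists, some unsettled node
-- carries its exact distance
lemma pvFrontier {x : Int} (S : Int → Prop) (g : Int → Int)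
    (hxv : pvValid x) (hx0 : g x = 0)
    (hset : ∀ s, S s → ∀ v w, pvEdge s v w → g v ≤ (pvδ x s : Int) + w)
    (hlow : ∀ v, pvValid v → (pvδ x v : Int) ≤ g v) :
    ∀ c : Nat, ∀ u n, pvWalk x u n → n ≤ c → ¬ S u →
      ∃ m, pvValid m ∧ ¬ S m ∧ g m = (pvδ x m : Int) ∧ pvδ x m ≤ c := by
  intro c
  induction c using Nat.strong_induction_on with
  | _ c IH =>
    intro u n W
    induction W with
    | refl =>
      intro _ hS
      refine ⟨x, hxv, hS, ?_, ?_⟩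
      · rw [hx0, pvδ_self]; rfl
      · rw [pvδ_self]; exact Nat.zero_le c
    | @step p u' n' w Wp e ih =>
      intro hn hu
      by_cases hp : S p
      · have hrel : g u' ≤ (pvδ x p : Int) + w := hset p hp u' w e
        have hdp : pvδ x p ≤ n' := pvδ_le_of_walk Wp
        have hvu : pvValid u' := e.2.1
        by_cases hgu : g u' = (pvδ x u' : Int)
        · refine ⟨u', hvu, hu, hgu, ?_⟩
          have h1 : (pvδ x u' : Int) ≤ (n' : Int) + w := by
            rw [← hgu]
            refine le_trans hrel ?_
            have : (pvδ x p : Int) ≤ (n' : Int) := by exact_mod_cast hdp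
            omega
          have h2 : ((n' + w : Nat) : Int) ≤ (c : Int) := by exact_mod_cast hn
          push_cast at h1 h2
          omega
        · have hlt : (pvδ x u' : Int) < g u' := lt_of_le_of_ne (hlow u' hvu) (fun h => hgu h.symm)
          have hcc : pvδ x u' < c := by
            have hdp' : (pvδ x p : Int) ≤ (n' : Int) := by exact_mod_cast hdp
            have h1 : g u' ≤ (n' : Int) + w := by omega
            have : ((n' + w : Nat) : Int) ≤ (c : Int) := by exact_mod_cast hn
            push_cast at this h1 ⊢
            omega
          obtain ⟨m, h1, h2, h3, h4⟩ :=
            IH (pvδ x u') hcc u' (pvδ x u') (pvWalk_δ hxv hvu) le_rfl hu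
          exact ⟨m, h1, h2, h3, le_trans h4 (le_of_lt hcc)⟩
      · exact ih (by omega) hp

-- ===== array access / measure helpers =====
def pvG (dist : Array Int) (v : Int) : Int := dist.getD v.toNat 0

lemma pvG_def (dist : Array Int) (v : Int) : dist.getD v.toNat 0 = pvG dist v := rfl

lemma pvToNat_inj {u v : Int} (hu : 0 ≤ u) (hv : 0 ≤ v) (h : u.toNat = v.toNat) : u = v := by omega

lemma pvG_eq (dist : Array Int) (v : Int) : pvG dist v = (dist[v.toNat]?).getD 0 := by
  unfold pvG; rw [Array.getD_eq_getD_getElem?]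

lemma pvG_set_self {dist : Array Int} {v : Int} (hs : dist.size = 100001)
    (hv : pvValid v) (c : Int) : pvG (dist.setIfInBounds v.toNat c) v = c := by
  rw [pvG_eq, Array.getElem?_setIfInBounds]
  have h : v.toNat < dist.size := by unfold pvValid at hv; omega
  simp [h]

lemma pvG_set_other {dist : Array Int} {v z : Int} (hne : v.toNat ≠ z.toNat) (c : Int) :
    pvG (dist.setIfInBounds v.toNat c) z = pvG dist z := by
  rw [pvG_eq, pvG_eq, Array.getElem?_setIfInBounds]
  simp [hne]

def pvSum (dist : Array Int) : Nat := (dist.toList.map Int.toNat).sum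

lemma pvList_sum_set (l : List Int) (c : Int) : ∀ i : Nat, i < l.length →
    ((l.set i c).map Int.toNat).sum + (l.getD i 0).toNat = (l.map Int.toNat).sum + c.toNat := by
  induction l with
  | nil => intro i h; simp at h
  | cons a l ih =>
    intro i h
    cases i with
    | zero => simp [List.set]; omega
    | succ i =>
      simp only [List.set, List.map, List.sum_cons, List.getD_cons_succ]
      have := ih i (by simpa using Nat.lt_of_succ_lt_succ h)
      omega

lemma pvSum_set {dist : Array Int} {v : Int} (h : v.toNat < dist.size) (c : Int) :
    pvSum (dist.setIfInBounds v.toNat c) + (pvG dist v).toNat = pvSum dist + c.toNat := by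
  unfold pvSum pvG
  rw [Array.toList_setIfInBounds]
  have hl : v.toNat < dist.toList.length := by simpa using h
  have hgd : dist.toList.getD v.toNat 0 = dist.getD v.toNat 0 := by
    rw [Array.getD_eq_getD_getElem?, List.getD_eq_getElem?_getD, ← Array.getElem?_toList]
  have := pvList_sum_set dist.toList c v.toNat hl
  rw [← hgd] at *
  rw [this]

lemma pvSum_le (dist : Array Int) (B : Nat) (h : ∀ a ∈ dist.toList, a.toNat ≤ B) :
    pvSum dist ≤ dist.size * B := by
  unfold pvSum
  have := List.sum_le_card_nsmul (dist.toList.map Int.toNat) B (by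
    intro a ha; obtain ⟨b, hb, rfl⟩ := List.mem_map.mp ha; exact h b hb)
  rw [smul_eq_mul, List.length_map, Array.length_toList] at this
  omega

-- ===== shared algorithm-state core =====
def pvRelaxed (x : Int) (S : Int → Prop) (dist : Array Int) : Prop :=
  ∀ s, S s → ∀ v w, pvEdge s v w → pvG dist v ≤ (pvδ x s : Int) + w

structure pvCore (x k : Int) (dist : Array Int) (S : Int → Prop) : Prop where
  hsize : dist.size = 100001
  hxv : pvValid x
  hkv : pvValid k
  hkS : ¬ S k
  hx0 : pvG dist x = 0
  hlow : ∀ v, pvValid v → (pvδ x v : Int) ≤ pvG dist v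
  hub  : ∀ v, pvValid v → pvG dist v ≤ pvInit
  hSval : ∀ s, S s → pvValid s
  hSg : ∀ s, S s → pvG dist s = (pvδ x s : Int)
  hrel : pvRelaxed x S dist

-- settled nodes never satisfy a relaxation guard
lemma pvCore.noguard {x k : Int} {dist : Array Int} {S : Int → Prop}
    (C : pvCore x k dist S) {u v : Int} {w : Nat}
    (hSv : S v) (e : pvEdge u v w) (hgu : pvG dist u = (pvδ x u : Int)) :
    ¬ pvG dist v > pvG dist u + (w : Int) := by
  have h1 : pvG dist v = (pvδ x v : Int) := C.hSg v hSv
  have h2 : pvδ x v ≤ pvδ x u + w := pvδ_edge_le C.hxv e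
  have h2' : (pvδ x v : Int) ≤ (pvδ x u : Int) + w := by exact_mod_cast h2
  omega

-- frontier lemma, packaged for a pvCore
lemma pvCore.frontier {x k : Int} {dist : Array Int} {S : Int → Prop}
    (C : pvCore x k dist S) {u : Int} (hv : pvValid u) (hS : ¬ S u) :
    ∃ m, pvValid m ∧ ¬ S m ∧ pvG dist m = (pvδ x m : Int) ∧ pvδ x m ≤ pvδ x u := by
  exact pvFrontier S (pvG dist) C.hxv C.hx0 (fun s hs => C.hrel s hs) C.hlow
    (pvδ x u) u (pvδ x u) (pvWalk_δ C.hxv hv) le_rfl hS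

lemma pvδ_lt_init {x v : Int} (hx : pvValid x) (hv : pvValid v) :
    (pvδ x v : Int) < pvInit := by
  have := pvδ_bound hx hv
  unfold pvInit
  have : (pvδ x v : Int) ≤ 100000 := by exact_mod_cast this
  omega

-- ===== A-side invariant =====
structure pvInvA (x k : Int) (dist : Array Int) (E : List (Int × Int)) (S : Int → Prop) : Prop where
  core : pvCore x k dist S
  hsort : List.Pairwise (fun a b : Int × Int => a.2 ≤ b.2) E
  hwin : ∀ a ∈ E, ∀ b ∈ E, a.2 ≤ b.2 + 1
  hent : ∀ e ∈ E, pvValid e.1 ∧ pvG dist e.1 ≤ e.2 ∧ (S e.1 → e.2 ≤ (pvδ x e.1 : Int) + 1)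
  hmem : ∀ v, pvValid v → ¬ S v → pvG dist v < pvInit → (v, pvG dist v) ∈ E

-- the queue cannot be empty while k is unsettled
lemma pvInvA.nonempty {x k : Int} {dist : Array Int} {E : List (Int × Int)} {S : Int → Prop}
    (I : pvInvA x k dist E S) : E ≠ [] := by
  obtain ⟨m, hmv, hmS, hmg, _⟩ := I.core.frontier I.core.hkv I.core.hkS
  have : (m, pvG dist m) ∈ E := I.hmem m hmv hmS (by rw [hmg]; exact pvδ_lt_init I.core.hxv hmv)
  intro h; rw [h] at this; simp at this

-- at a pop, the head's node carries its exact distance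
lemma pvInvA.popExact {x k : Int} {dist : Array Int} {u t : Int} {E' : List (Int × Int)}
    {S : Int → Prop} (I : pvInvA x k dist ((u, t) :: E') S) :
    pvValid u ∧ pvG dist u = (pvδ x u : Int) ∧ pvG dist u ≤ t ∧
      (¬ S u → t = (pvδ x u : Int)) := by
  have hvu : pvValid u := (I.hent (u, t) (by simp)).1
  have hut : pvG dist u ≤ t := (I.hent (u, t) (by simp)).2.1
  by_cases hSu : S u
  · exact ⟨hvu, I.core.hSg u hSu, hut, fun h => absurd hSu h⟩
  · obtain ⟨m, hmv, hmS, hmg, hmd⟩ := I.core.frontier hvu hSu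
    have hmem : (m, pvG dist m) ∈ (u, t) :: E' :=
      I.hmem m hmv hmS (by rw [hmg]; exact pvδ_lt_init I.core.hxv hmv)
    have hmd' : (pvδ x m : Int) ≤ (pvδ x u : Int) := by exact_mod_cast hmd
    have hlowu : (pvδ x u : Int) ≤ pvG dist u := I.core.hlow u hvu
    rcases List.mem_cons.mp hmem with heq | hmemE
    · -- the head itself is the exact-distance node
      have h1 : m = u := congrArg Prod.fst heq
      have h2 : pvG dist m = t := congrArg Prod.snd heq
      rw [h1] at hmg
      constructor
      · exact hvu
      · exact ⟨hmg, hut, fun _ => by rw [← h2, h1, hmg]⟩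
    · -- the head's tag is minimal
      have hts : t ≤ pvG dist m := by
        have := List.pairwise_cons.mp I.hsort
        exact this.1 (m, pvG dist m) hmemE
      have heq : pvG dist u = (pvδ x u : Int) ∧ t = (pvδ x u : Int) := by
        rw [hmg] at hts
        constructor <;> omega
      exact ⟨hvu, heq.1, hut, fun _ => heq.2⟩

-- mid-relaxation invariant for the body of A's loop (u freshly popped, unsettled,
-- tag window pinned at pvδ x u)
structure pvMidA (x k u : Int) (dist : Array Int) (E : List (Int × Int)) (S : Int → Prop) : Prop where
  core : pvCore x k dist S
  huv : pvValid u
  hSu : ¬ S u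
  hgu : pvG dist u = (pvδ x u : Int)
  hsort : List.Pairwise (fun a b : Int × Int => a.2 ≤ b.2) E
  hwin : ∀ a ∈ E, (pvδ x u : Int) ≤ a.2 ∧ a.2 ≤ (pvδ x u : Int) + 1
  hent : ∀ e ∈ E, pvValid e.1 ∧ pvG dist e.1 ≤ e.2 ∧ ((S e.1 ∨ e.1 = u) → e.2 ≤ (pvδ x e.1 : Int) + 1)
  hmem : ∀ v, pvValid v → ¬ S v → v ≠ u → pvG dist v < pvInit → (v, pvG dist v) ∈ E

-- one successful relaxation in A's loop body
lemma pvRelaxA_update {x k u : Int} {dist : Array Int} {E : List (Int × Int)} {S : Int → Prop}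
    (M : pvMidA x k u dist E S) (v : Int) (w : Nat)
    (hsh : (w = 1 ∧ (v = u + 1 ∨ v = u - 1)) ∨ (w = 0 ∧ v = 2 * u))
    (hval : pvValid v) (hgt : pvG dist v > (pvδ x u : Int) + w) :
    pvMidA x k u (dist.setIfInBounds v.toNat ((pvδ x u : Int) + w))
      (if w = 0 then (v, (pvδ x u : Int)) :: E else E ++ [(v, (pvδ x u : Int) + 1)]) S ∧
    pvG (dist.setIfInBounds v.toNat ((pvδ x u : Int) + w)) v = (pvδ x u : Int) + w ∧
    (∀ z, pvG (dist.setIfInBounds v.toNat ((pvδ x u : Int) + w)) z ≤ pvG dist z) ∧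
    2 * pvSum (dist.setIfInBounds v.toNat ((pvδ x u : Int) + w)) + 2 ≤ 2 * pvSum dist := by
  have C := M.core
  have e : pvEdge u v w := ⟨M.huv, hval, by tauto⟩
  have hw01 : (w : Int) = 0 ∨ (w : Int) = 1 := by rcases hsh with ⟨h, _⟩ | ⟨h, _⟩ <;> simp [h]
  have hgt2 : pvG dist v > pvG dist u + (w : Int) := by rw [M.hgu]; exact hgt
  have hvS : ¬ S v := fun hSv => C.noguard hSv e M.hgu hgt2
  have hvu : v ≠ u := by
    intro h; rw [h, M.hgu] at hgt; omega
  have hδv : (pvδ x v : Int) ≤ (pvδ x u : Int) + w := by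
    exact_mod_cast pvδ_edge_le C.hxv e
  have hvx : v ≠ x := by
    intro h; rw [h, C.hx0] at hgt
    have := pvδ_self x
    have h0 : (0:Int) ≤ (pvδ x u : Int) + w := by positivity
    omega
  have hset : dist.size = 100001 := C.hsize
  have hGv : pvG (dist.setIfInBounds v.toNat ((pvδ x u : Int) + w)) v = (pvδ x u : Int) + w :=
    pvG_set_self hset hval _
  have hGother : ∀ z : Int, z.toNat ≠ v.toNat →
      pvG (dist.setIfInBounds v.toNat ((pvδ x u : Int) + w)) z = pvG dist z := by
    intro z hz; exact pvG_set_other (fun h => hz h.symm) _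
  have hGsame : ∀ z : Int, z.toNat = v.toNat →
      pvG (dist.setIfInBounds v.toNat ((pvδ x u : Int) + w)) z = (pvδ x u : Int) + w := by
    intro z hz
    unfold pvG at *
    rw [hz, hGv]
  have hmono : ∀ z, pvG (dist.setIfInBounds v.toNat ((pvδ x u : Int) + w)) z ≤ pvG dist z := by
    intro z
    by_cases hz : z.toNat = v.toNat
    · rw [hGsame z hz]
      have : pvG dist z = pvG dist v := by unfold pvG; rw [hz]
      omega
    · rw [hGother z hz]
  have hne_valid : ∀ z : Int, pvValid z → z ≠ v → z.toNat ≠ v.toNat := by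
    intro z hz hzv h
    exact hzv (pvToNat_inj hz.1 hval.1 h)
  have hmeas : 2 * pvSum (dist.setIfInBounds v.toNat ((pvδ x u : Int) + w)) + 2 ≤ 2 * pvSum dist := by
    have h1 : v.toNat < dist.size := by rw [hset]; unfold pvValid at hval; omega
    have h2 := pvSum_set (dist := dist) (v := v) h1 ((pvδ x u : Int) + w)
    have h3 : ((pvδ x u : Int) + w).toNat + 1 ≤ (pvG dist v).toNat := by omega
    omega
  refine ⟨?_, hGv, hmono, hmeas⟩
  constructor
  -- core
  case core =>
    refine ⟨by simp [Array.size_setIfInBounds, hset], C.hxv, C.hkv, C.hkS, ?_, ?_, ?_, C.hSval, ?_, ?_⟩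
    · rw [hGother x (hne_valid x C.hxv (fun h => hvx h.symm))]; exact C.hx0
    · intro z hz
      by_cases h : z = v
      · subst h; rw [hGv]; exact hδv
      · rw [hGother z (hne_valid z hz h)]; exact C.hlow z hz
    · intro z hz
      by_cases h : z = v
      · subst h; rw [hGv]
        have h1 := pvδ_lt_init C.hxv M.huv
        omega
      · rw [hGother z (hne_valid z hz h)]; exact C.hub z hz
    · intro s hs
      have : s ≠ v := fun h => hvS (h ▸ hs)
      rw [hGother s (hne_valid s (C.hSval s hs) this)]; exact C.hSg s hs
    · intro s hs z w' e'
      exact le_trans (hmono z) (C.hrel s hs z w' e')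
  case huv => exact M.huv
  case hSu => exact M.hSu
  case hgu =>
    rw [hGother u (hne_valid u M.huv (Ne.symm hvu))]; exact M.hgu
  case hsort =>
    by_cases hw : w = 0
    · simp only [hw, if_pos]
      refine List.pairwise_cons.mpr ⟨?_, M.hsort⟩
      intro b hb; exact (M.hwin b hb).1
    · simp only [hw, ite_false]
      rw [List.pairwise_append]
      refine ⟨M.hsort, List.pairwise_singleton _ _, ?_⟩
      intro a ha b hb
      simp at hb; rw [hb]
      simp only
      exact le_trans (M.hwin a ha).2 le_rfl
  case hwin =>
    intro a ha
    by_cases hw : w = 0 <;> simp only [hw, ite_false, ite_true] at ha ⊢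
    · rcases List.mem_cons.mp ha with h | h
      · rw [h]; constructor <;> simp
      · exact M.hwin a h
    · rcases List.mem_append.mp ha with h | h
      · exact M.hwin a h
      · simp at h; rw [h]; constructor <;> simp
  case hent =>
    intro a ha
    have hnew : a = (v, (pvδ x u : Int) + w) ∨ a ∈ E := by
      by_cases hw : w = 0
      · simp only [hw, if_pos] at ha
        rcases List.mem_cons.mp ha with h | h
        · left; rw [h, hw]; simp
        · right; exact h
      · have hw1 : w = 1 := by omega
        simp only [hw, ite_false] at ha
        rcases List.mem_append.mp ha with h | h
        · right; exact h
        · left; simp at h; rw [h, hw1]; simp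
    rcases hnew with h | h
    · rw [h]
      refine ⟨hval, by rw [hGv], ?_⟩
      intro hS'
      rcases hS' with h' | h'
      · exact absurd h' hvS
      · exact absurd h' hvu
    · obtain ⟨h1, h2, h3⟩ := M.hent a h
      exact ⟨h1, le_trans (hmono a.1) h2, h3⟩
  case hmem =>
    intro z hz hzS hzu hzlt
    by_cases h : z = v
    · subst h
      rw [hGv]
      by_cases hw : w = 0
      · simp only [hw, ite_true, Nat.cast_zero, add_zero]
        exact List.mem_cons_self
      · have hw1 : w = 1 := by omega
        simp only [hw, ite_false]
        exact List.mem_append.mpr (Or.inr (by simp [hw1]))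
    · rw [hGother z (hne_valid z hz h)] at hzlt ⊢
      have hmem := M.hmem z hz hzS hzu hzlt
      by_cases hw : w = 0 <;> simp only [hw, ite_false, ite_true]
      · exact List.mem_cons_of_mem _ hmem
      · exact List.mem_append.mpr (Or.inl hmem)

-- settling the popped node once every edge out of it is relaxed
lemma pvMidA.settle {x k u : Int} {dist : Array Int} {E : List (Int × Int)} {S : Int → Prop}
    (M : pvMidA x k u dist E S) (huk : u ≠ k)
    (hrelu : ∀ v w, pvEdge u v w → pvG dist v ≤ (pvδ x u : Int) + w) :
    pvInvA x k dist E (fun z => S z ∨ z = u) := by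
  have C := M.core
  refine ⟨⟨C.hsize, C.hxv, C.hkv, ?_, C.hx0, C.hlow, C.hub, ?_, ?_, ?_⟩, M.hsort, ?_, ?_, ?_⟩
  · rintro (h | h); exact C.hkS h; exact huk h.symm
  · rintro s (h | h); exact C.hSval s h; subst h; exact M.huv
  · rintro s (h | h); exact C.hSg s h; subst h; exact M.hgu
  · rintro s (h | h) z w e
    · exact C.hrel s h z w e
    · subst h; exact hrelu z w e
  · intro a ha b hb
    have h1 := (M.hwin a ha).2
    have h2 := (M.hwin b hb).1
    omega
  · intro e he
    obtain ⟨h1, h2, h3⟩ := M.hent e he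
    exact ⟨h1, h2, h3⟩
  · intro z hz hzS hzlt
    rw [not_or] at hzS
    exact M.hmem z hz hzS.1 hzS.2 hzlt

-- pvPop specification
lemma pvPop_none {f b : List Int} (h : pvPop f b = none) : f ++ b.reverse = [] := by
  unfold pvPop at h
  cases f with
  | cons u f' => simp at h
  | nil =>
    cases hr : b.reverse with
    | nil => simp
    | cons u f' => rw [hr] at h; simp at h

lemma pvPop_some {f b : List Int} {u : Int} {f' b' : List Int}
    (h : pvPop f b = some (u, f', b')) : f ++ b.reverse = u :: (f' ++ b'.reverse) := by
  unfold pvPop at h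
  cases f with
  | cons v f0 =>
    simp at h
    obtain ⟨h1, h2, h3⟩ := h
    subst h1; subst h2; subst h3; simp
  | nil =>
    cases hr : b.reverse with
    | nil => rw [hr] at h; simp at h
    | cons v f0 =>
      rw [hr] at h
      simp at h
      obtain ⟨h1, h2, h3⟩ := h
      subst h1; subst h2; subst h3
      simp

-- dropping a settled (stale) head
lemma pvInvA.dropSettled {x k u t : Int} {dist : Array Int} {E' : List (Int × Int)}
    {S : Int → Prop} (I : pvInvA x k dist ((u, t) :: E') S) (hS : S u) :
    pvInvA x k dist E' S := by
  refine ⟨I.core, (List.pairwise_cons.mp I.hsort).2, ?_, ?_, ?_⟩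
  · intro a ha b hb
    exact I.hwin a (List.mem_cons_of_mem _ ha) b (List.mem_cons_of_mem _ hb)
  · intro e he; exact I.hent e (List.mem_cons_of_mem _ he)
  · intro v hv hvS hvlt
    have := I.hmem v hv hvS hvlt
    rcases List.mem_cons.mp this with h | h
    · exfalso
      have hvu : v = u := congrArg Prod.fst h
      exact hvS (hvu ▸ hS)
    · exact h

-- popping an unsettled head: the mid-invariant holds
lemma pvInvA.toMid {x k u t : Int} {dist : Array Int} {E' : List (Int × Int)}
    {S : Int → Prop} (I : pvInvA x k dist ((u, t) :: E') S) (hSu : ¬ S u) :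
    pvMidA x k u dist E' S := by
  obtain ⟨hvu, hgu, hut, htag⟩ := I.popExact
  have ht : t = (pvδ x u : Int) := htag hSu
  refine ⟨I.core, hvu, hSu, hgu, (List.pairwise_cons.mp I.hsort).2, ?_, ?_, ?_⟩
  · intro a ha
    constructor
    · rw [← ht]; exact (List.pairwise_cons.mp I.hsort).1 a ha
    · rw [← ht]
      exact I.hwin a (List.mem_cons_of_mem _ ha) (u, t) List.mem_cons_self
  · intro e he
    obtain ⟨h1, h2, h3⟩ := I.hent e (List.mem_cons_of_mem _ he)
    refine ⟨h1, h2, ?_⟩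
    rintro (hS | hequ)
    · exact h3 hS
    · have : e.2 ≤ t + 1 :=
        I.hwin e (List.mem_cons_of_mem _ he) (u, t) List.mem_cons_self
      rw [hequ, ← ht]
      exact this
  · intro v hv hvS hvu hvlt
    have := I.hmem v hv hvS hvlt
    rcases List.mem_cons.mp this with h | h
    · exact absurd (congrArg Prod.fst h) hvu
    · exact h

-- specialized relax corollaries matching the port's literal guards
lemma pvRelaxA_back {x k u : Int} {dist : Array Int} {E : List (Int × Int)} {S : Int → Prop}
    (M : pvMidA x k u dist E S) (v : Int) (hsh : v = u + 1 ∨ v = u - 1)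
    (hval : pvValid v) (hgt : pvG dist v > (pvδ x u : Int) + 1) :
    pvMidA x k u (dist.setIfInBounds v.toNat ((pvδ x u : Int) + 1)) (E ++ [(v, (pvδ x u : Int) + 1)]) S ∧
    pvG (dist.setIfInBounds v.toNat ((pvδ x u : Int) + 1)) v = (pvδ x u : Int) + 1 ∧
    (∀ z, pvG (dist.setIfInBounds v.toNat ((pvδ x u : Int) + 1)) z ≤ pvG dist z) ∧
    2 * pvSum (dist.setIfInBounds v.toNat ((pvδ x u : Int) + 1)) + 2 ≤ 2 * pvSum dist := by
  have h := pvRelaxA_update M v 1 (Or.inl ⟨rfl, hsh⟩) hval (by push_cast; exact hgt)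
  simpa using h

lemma pvRelaxA_front {x k u : Int} {dist : Array Int} {E : List (Int × Int)} {S : Int → Prop}
    (M : pvMidA x k u dist E S)
    (hval : pvValid (2 * u)) (hgt : pvG dist (2 * u) > (pvδ x u : Int)) :
    pvMidA x k u (dist.setIfInBounds (2 * u).toNat ((pvδ x u : Int))) ((2 * u, (pvδ x u : Int)) :: E) S ∧
    pvG (dist.setIfInBounds (2 * u).toNat ((pvδ x u : Int))) (2 * u) = (pvδ x u : Int) ∧
    (∀ z, pvG (dist.setIfInBounds (2 * u).toNat ((pvδ x u : Int))) z ≤ pvG dist z) ∧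
    2 * pvSum (dist.setIfInBounds (2 * u).toNat ((pvδ x u : Int))) + 2 ≤ 2 * pvSum dist := by
  have h := pvRelaxA_update M (2 * u) 0 (Or.inr ⟨rfl, rfl⟩) hval (by push_cast; exact hgt)
  simpa using h

-- after the three edges of u are relaxed, u is settled
lemma pvFinishA {x k u : Int} {dist3 : Array Int} {E3 : List (Int × Int)} {S : Int → Prop}
    (M : pvMidA x k u dist3 E3 S) (huk : u ≠ k)
    (r1 : pvValid (u + 1) → pvG dist3 (u + 1) ≤ (pvδ x u : Int) + 1)
    (r2 : pvValid (u - 1) → pvG dist3 (u - 1) ≤ (pvδ x u : Int) + 1)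
    (r3 : pvValid (2 * u) → pvG dist3 (2 * u) ≤ (pvδ x u : Int)) :
    pvInvA x k dist3 E3 (fun z => S z ∨ z = u) := by
  apply M.settle huk
  intro v w e
  obtain ⟨_, hv, hshape⟩ := e
  rcases hshape with ⟨hw, hv1⟩ | ⟨hw, hv1⟩
  · subst hw
    rcases hv1 with h | h <;> subst h
    · have := r1 hv; push_cast; exact this
    · have := r2 hv; push_cast; exact this
  · subst hw
    subst hv1
    have := r3 hv; push_cast; exact this

-- one full conditional-relaxation step (±1 edge, appended at the back)
lemma pvStepA_back {x k u : Int} {dist : Array Int} {E : List (Int × Int)} {S : Int → Prop}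
    (M : pvMidA x k u dist E S) (v : Int) (hsh : v = u + 1 ∨ v = u - 1) :
    ∃ D E2,
      D = (if 0 ≤ v ∧ v ≤ 100000 ∧ dist.getD v.toNat 0 > (pvδ x u : Int) + 1 then
             dist.setIfInBounds v.toNat ((pvδ x u : Int) + 1) else dist) ∧
      E2 = (if 0 ≤ v ∧ v ≤ 100000 ∧ dist.getD v.toNat 0 > (pvδ x u : Int) + 1 then
             E ++ [(v, (pvδ x u : Int) + 1)] else E) ∧
      pvMidA x k u D E2 S ∧
      (pvValid v → pvG D v ≤ (pvδ x u : Int) + 1) ∧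
      (∀ z, pvG D z ≤ pvG dist z) ∧
      (2 * pvSum D + E2.length ≤ 2 * pvSum dist + E.length) ∧
      D.getD u.toNat 0 = (pvδ x u : Int) := by
  by_cases hc : 0 ≤ v ∧ v ≤ 100000 ∧ dist.getD v.toNat 0 > (pvδ x u : Int) + 1
  · obtain ⟨h1, h2, h3⟩ := hc
    obtain ⟨M1, g1, mono1, meas1⟩ := pvRelaxA_back M v hsh ⟨h1, h2⟩ h3
    refine ⟨_, _, by rw [if_pos ⟨h1, h2, h3⟩], by rw [if_pos ⟨h1, h2, h3⟩], M1, ?_, mono1, ?_, M1.hgu⟩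
    · intro _; rw [g1]
    · simp only [List.length_append, List.length_cons, List.length_nil]
      omega
  · refine ⟨_, _, by rw [if_neg hc], by rw [if_neg hc], M, ?_, fun z => le_rfl, le_rfl, M.hgu⟩
    intro hv
    by_contra hgt
    exact hc ⟨hv.1, hv.2, by show pvG dist v > _; omega⟩

-- the cost-0 doubling edge, prepended at the front
lemma pvStepA_front {x k u : Int} {dist : Array Int} {E : List (Int × Int)} {S : Int → Prop}
    (M : pvMidA x k u dist E S) :
    ∃ D E2,
      D = (if 0 ≤ 2 * u ∧ 2 * u ≤ 100000 ∧ dist.getD (2 * u).toNat 0 > (pvδ x u : Int) then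
             dist.setIfInBounds (2 * u).toNat ((pvδ x u : Int)) else dist) ∧
      E2 = (if 0 ≤ 2 * u ∧ 2 * u ≤ 100000 ∧ dist.getD (2 * u).toNat 0 > (pvδ x u : Int) then
             (2 * u, (pvδ x u : Int)) :: E else E) ∧
      pvMidA x k u D E2 S ∧
      (pvValid (2 * u) → pvG D (2 * u) ≤ (pvδ x u : Int)) ∧
      (∀ z, pvG D z ≤ pvG dist z) ∧
      (2 * pvSum D + E2.length ≤ 2 * pvSum dist + E.length) ∧
      D.getD u.toNat 0 = (pvδ x u : Int) := by
  by_cases hc : 0 ≤ 2 * u ∧ 2 * u ≤ 100000 ∧ dist.getD (2 * u).toNat 0 > (pvδ x u : Int)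
  · obtain ⟨h1, h2, h3⟩ := hc
    obtain ⟨M1, g1, mono1, meas1⟩ := pvRelaxA_front M ⟨h1, h2⟩ h3
    refine ⟨_, _, by rw [if_pos ⟨h1, h2, h3⟩], by rw [if_pos ⟨h1, h2, h3⟩], M1, ?_, mono1, ?_, M1.hgu⟩
    · intro _; rw [g1]
    · simp only [List.length_cons]
      omega
  · refine ⟨_, _, by rw [if_neg hc], by rw [if_neg hc], M, ?_, fun z => le_rfl, le_rfl, M.hgu⟩
    intro hv
    by_contra hgt
    exact hc ⟨hv.1, hv.2, by show pvG dist (2 * u) > _; omega⟩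

lemma pvALoop_eq (x k : Int) :
    ∀ fuel (f b : List Int) (dist : Array Int) (E : List (Int × Int)) (S : Int → Prop),
      pvInvA x k dist E S →
      f ++ b.reverse = E.map Prod.fst →
      2 * pvSum dist + E.length < fuel →
      pvALoop k fuel f b dist = (pvδ x k : Int) := by
  intro fuel
  induction fuel with
  | zero => intro f b dist E S I hq hm; omega
  | succ fuel IH =>
    intro f b dist E S I hq hm
    cases hp : pvPop f b with
    | none =>
      exfalso
      have hqe : f ++ b.reverse = [] := pvPop_none hp
      apply I.nonempty
      cases E with
      | nil => rfl
      | cons e E' => rw [hqe] at hq; simp at hq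
    | some ufb =>
      obtain ⟨u, f', b'⟩ := ufb
      have hqs : f ++ b.reverse = u :: (f' ++ b'.reverse) := pvPop_some hp
      cases E with
      | nil => rw [hqs] at hq; simp at hq
      | cons e E' =>
        obtain ⟨u0, t⟩ := e
        rw [hqs] at hq
        simp only [List.map_cons] at hq
        have hu0 : u = u0 := by exact ((List.cons.injEq _ _ _ _).mp hq).1
        have hq' : f' ++ b'.reverse = E'.map Prod.fst := by
          exact ((List.cons.injEq _ _ _ _).mp hq).2
        subst hu0
        by_cases huk : u = k
        · -- return dist[k]
          subst huk
          obtain ⟨hvu, hgu, _, _⟩ := I.popExact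
          simp only [pvALoop, hp, if_true]
          exact hgu
        · by_cases hSu : S u
          · -- stale pop of a settled node: no guard fires
            have C := I.core
            have hgu : pvG dist u = (pvδ x u : Int) := C.hSg u hSu
            have hvu : pvValid u := C.hSval u hSu
            have hc1 : ¬ (0 ≤ u+1 ∧ u+1 ≤ 100000 ∧ dist.getD (u+1).toNat 0 > dist.getD u.toNat 0 + 1) := by
              rintro ⟨h1, h2, h3⟩
              have e1 : pvEdge u (u+1) 1 := ⟨hvu, ⟨h1, h2⟩, Or.inl ⟨rfl, Or.inl rfl⟩⟩
              have := C.hrel u hSu (u+1) 1 e1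
              rw [pvG_def, pvG_def, hgu] at h3
              push_cast at this
              omega
            have hc2 : ¬ (0 ≤ u-1 ∧ u-1 ≤ 100000 ∧ dist.getD (u-1).toNat 0 > dist.getD u.toNat 0 + 1) := by
              rintro ⟨h1, h2, h3⟩
              have e1 : pvEdge u (u-1) 1 := ⟨hvu, ⟨h1, h2⟩, Or.inl ⟨rfl, Or.inr rfl⟩⟩
              have := C.hrel u hSu (u-1) 1 e1
              rw [pvG_def, pvG_def, hgu] at h3
              push_cast at this
              omega
            have hc3 : ¬ (0 ≤ 2*u ∧ 2*u ≤ 100000 ∧ dist.getD (2*u).toNat 0 > dist.getD u.toNat 0) := by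
              rintro ⟨h1, h2, h3⟩
              have e1 : pvEdge u (2*u) 0 := ⟨hvu, ⟨h1, h2⟩, Or.inr ⟨rfl, rfl⟩⟩
              have := C.hrel u hSu (2*u) 0 e1
              rw [pvG_def, pvG_def, hgu] at h3
              push_cast at this
              omega
            simp only [pvALoop, hp, if_neg huk, if_neg hc1, if_neg hc2, if_neg hc3]
            apply IH f' b' dist E' S (I.dropSettled hSu) hq'
            simp only [List.length_cons] at hm
            omega
          · -- fresh pop: relax the three edges of u, settle it, and recurse
            have M0 := I.toMid hSu
            simp only [pvALoop, hp, if_neg huk]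
            rw [pvG_def dist u, M0.hgu]
            simp only [apply_ite (f := Prod.fst), apply_ite (f := Prod.snd), ite_self]
            obtain ⟨D1, E1, hD1, hE1, M1, r1, mono1, meas1, hgu1⟩ := pvStepA_back M0 (u + 1) (Or.inl rfl)
            rw [← hD1, hgu1]
            obtain ⟨D2, E2, hD2, hE2, M2, r2, mono2, meas2, hgu2⟩ := pvStepA_back M1 (u - 1) (Or.inr rfl)
            rw [← hD2, hgu2]
            obtain ⟨D3, E3, hD3, hE3, M3, r3, mono3, meas3, hgu3⟩ := pvStepA_front M2
            rw [← hD3]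
            have Ifin : pvInvA x k D3 E3 (fun z => S z ∨ z = u) :=
              pvFinishA M3 huk
                (fun hv => le_trans (mono3 _) (le_trans (mono2 _) (r1 hv)))
                (fun hv => le_trans (mono3 _) (r2 hv))
                r3
            apply IH _ _ D3 E3 _ Ifin
            · rw [hE3, hE2, hE1]
              split_ifs <;> simp [← hq']
            · simp only [List.length_cons] at hm
              omega

-- initial distance array
lemma pvG_init (x : Int) (hx : pvValid x) (z : Int) (hz : pvValid z) :
    pvG ((Array.replicate 100001 pvInit).setIfInBounds x.toNat 0) z
      = if z = x then 0 else pvInit := by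
  by_cases h : z = x
  · subst h
    rw [if_pos rfl]
    exact pvG_set_self (by simp) hz 0
  · rw [if_neg h]
    rw [pvG_set_other (fun hh => h (pvToNat_inj hz.1 hx.1 hh.symm).symm.symm)]
    rw [pvG_eq]
    have hlt : z.toNat < 100001 := by unfold pvValid at hz; omega
    simp [hlt]

lemma pvSum_init (x : Int) :
    pvSum ((Array.replicate 100001 pvInit).setIfInBounds x.toNat 0) ≤ 100001 * pvInit.toNat := by
  have h := pvSum_le ((Array.replicate 100001 pvInit).setIfInBounds x.toNat 0) pvInit.toNat ?_
  · simpa [Array.size_setIfInBounds] using h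
  · intro a ha
    rw [Array.toList_setIfInBounds] at ha
    rcases List.mem_or_eq_of_mem_set ha with h | h
    · rw [List.eq_of_mem_replicate h]
    · rw [h]; simp

lemma pvInvA_init (x k : Int) (hx : pvValid x) (hk : pvValid k) :
    pvInvA x k ((Array.replicate 100001 pvInit).setIfInBounds x.toNat 0) [(x, 0)] (fun _ => False) := by
  have hg := pvG_init x hx
  refine ⟨⟨by simp, hx, hk, fun h => h, ?_, ?_, ?_, fun s h => absurd h (fun h => h),
      fun s h => absurd h (fun h => h), fun s h => absurd h (fun h => h)⟩, ?_, ?_, ?_, ?_⟩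
  · rw [hg x hx, if_pos rfl]
  · intro v hv
    rw [hg v hv]
    by_cases h : v = x
    · subst h; rw [if_pos rfl, pvδ_self]; simp
    · rw [if_neg h]
      exact le_of_lt (pvδ_lt_init hx hv)
  · intro v hv
    rw [hg v hv]
    by_cases h : v = x <;> simp [h]
    unfold pvInit; omega
  · exact List.pairwise_singleton _ _
  · intro a ha b hb
    simp at ha hb
    rw [ha, hb]
    omega
  · intro e he
    simp at he
    rw [he]
    refine ⟨hx, ?_, fun h => absurd h (fun h => h)⟩
    rw [hg x hx, if_pos rfl]
  · intro v hv _ hvlt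
    rw [hg v hv] at hvlt ⊢
    by_cases h : v = x
    · subst h; simp
    · rw [if_neg h] at hvlt; omega

lemma pvFuel_big : 2 * (100001 * pvInit.toNat) + 1 < pvFuel := by
  have h : pvInit.toNat = 10000000000000000000000000000000000000 := rfl
  rw [h]
  unfold pvFuel
  norm_num

lemma zero_one_bfs_eq (x k : Int) (hx : pvValid x) (hk : pvValid k) :
    zero_one_bfs x k = (pvδ x k : Int) := by
  unfold zero_one_bfs
  apply pvALoop_eq x k pvFuel [x] [] _ [(x, 0)] (fun _ => False) (pvInvA_init x k hx hk)
  · simp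
  · have h1 := pvSum_init x
    have h2 := pvFuel_big
    simp only [List.length_cons, List.length_nil]
    omega

-- ===== B-side (Dial's algorithm) invariant =====
def pvBSum (buckets : Array (List Int)) : Nat := (buckets.toList.map List.length).sum

lemma pvList_sum_set' {α : Type} (f : α → Nat) (l : List α) (y : α) : ∀ i : Nat, i < l.length →
    ((l.set i y).map f).sum + f (l.getD i y) = (l.map f).sum + f y := by
  induction l with
  | nil => intro i h; simp at h
  | cons a l ih =>
    intro i h
    cases i with
    | zero => simp [List.set]; omega
    | succ i =>
      simp only [List.set, List.map, List.sum_cons, List.getD_cons_succ]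
      have := ih i (by simpa using Nat.lt_of_succ_lt_succ h)
      omega

lemma pvBGetD_eq (buckets : Array (List Int)) (j : Nat) :
    buckets.getD j [] = (buckets[j]?).getD [] := Array.getD_eq_getD_getElem?

lemma pvBGet_set_self {buckets : Array (List Int)} {j : Nat} (h : j < buckets.size) (L : List Int) :
    (buckets.setIfInBounds j L).getD j [] = L := by
  rw [pvBGetD_eq, Array.getElem?_setIfInBounds]
  simp [h]

lemma pvBGet_set_other {buckets : Array (List Int)} {j j' : Nat} (h : j ≠ j') (L : List Int) :
    (buckets.setIfInBounds j L).getD j' [] = buckets.getD j' [] := by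
  rw [pvBGetD_eq, pvBGetD_eq, Array.getElem?_setIfInBounds]
  simp [h]

lemma pvBSum_set {buckets : Array (List Int)} {j : Nat} (h : j < buckets.size) (L : List Int) :
    pvBSum (buckets.setIfInBounds j L) + (buckets.getD j []).length = pvBSum buckets + L.length := by
  unfold pvBSum
  rw [Array.toList_setIfInBounds]
  have hl : j < buckets.toList.length := by simpa using h
  have hgd : buckets.toList.getD j L = buckets.getD j [] := by
    rw [Array.getD_eq_getD_getElem?, List.getD_eq_getElem?_getD, ← Array.getElem?_toList]
    rw [List.getElem?_eq_getElem hl]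
    simp
  have := pvList_sum_set' List.length buckets.toList L j hl
  rw [hgd] at this
  exact this

structure pvInvB (x k : Int) (dist : Array Int) (buckets : Array (List Int)) (d : Nat)
    (S : Int → Prop) : Prop where
  core : pvCore x k dist S
  hbsize : buckets.size = 100002
  hkey : ∀ j : Nat, ∀ v ∈ buckets.getD j [], pvValid v ∧ pvG dist v ≤ (j : Int) ∧ j ≤ 100001
  hempty : ∀ j : Nat, j < d → buckets.getD j [] = []
  hmem : ∀ v, pvValid v → ¬ S v → pvG dist v < pvInit →
    v ∈ buckets.getD (pvG dist v).toNat []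

-- when every bucket below d is empty and v is popped from bucket d with dist[v] = d,
-- that value is exact
lemma pvInvB.popExact {x k : Int} {dist : Array Int} {buckets : Array (List Int)} {d : Nat}
    {S : Int → Prop} (I : pvInvB x k dist buckets d S) {u : Int}
    (hu : u ∈ buckets.getD d []) (hge : ¬ pvG dist u < (d : Int)) :
    pvValid u ∧ pvG dist u = (d : Int) ∧ pvδ x u = d := by
  obtain ⟨hvu, hle, _⟩ := I.hkey d u hu
  have hgu : pvG dist u = (d : Int) := by omega
  refine ⟨hvu, hgu, ?_⟩
  by_cases hSu : S u
  · have h := I.core.hSg u hSu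
    rw [hgu] at h
    exact_mod_cast h.symm
  · obtain ⟨m, hmv, hmS, hmg, hmd⟩ := I.core.frontier hvu hSu
    have hmem := I.hmem m hmv hmS (by rw [hmg]; exact pvδ_lt_init I.core.hxv hmv)
    have hnd : ¬ (pvG dist m).toNat < d := by
      intro hlt
      rw [I.hempty _ hlt] at hmem
      simp at hmem
    have hglow := I.core.hlow u hvu
    have hmg' : (pvG dist m).toNat = pvδ x m := by rw [hmg]; simp
    rw [hmg'] at hnd
    have : pvδ x u ≤ d := by
      rw [hgu] at hglow
      exact_mod_cast hglow
    omega

-- a stale pop is a pop of a settled node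
lemma pvInvB.staleSettled {x k : Int} {dist : Array Int} {buckets : Array (List Int)} {d : Nat}
    {S : Int → Prop} (I : pvInvB x k dist buckets d S) {u : Int}
    (hu : u ∈ buckets.getD d []) (hlt : pvG dist u < (d : Int)) : S u := by
  obtain ⟨hvu, _, _⟩ := I.hkey d u hu
  by_contra hSu
  have hglow := I.core.hlow u hvu
  have hmem := I.hmem u hvu hSu (lt_of_lt_of_le hlt (by
    have := pvδ_lt_init I.core.hxv I.core.hkv
    unfold pvInit
    omega))
  have hnd : (pvG dist u).toNat < d := by
    have hd0 : (0:Int) ≤ pvG dist u := le_trans (by positivity) hglow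
    omega
  rw [I.hempty _ hnd] at hmem
  simp at hmem

-- removing the popped head of bucket d keeps the invariant when its node is settled
-- or freshly settled nodes are accounted in S
lemma pvInvB.popBucket {x k : Int} {dist : Array Int} {buckets : Array (List Int)} {d : Nat}
    {S : Int → Prop} (I : pvInvB x k dist buckets d S) {u : Int} {rest : List Int}
    (hb : buckets.getD d [] = u :: rest) (hSu : S u) :
    pvInvB x k dist (buckets.setIfInBounds d rest) d S := by
  have hd : d < buckets.size := by
    by_contra h
    rw [pvBGetD_eq, Array.getElem?_eq_none (by omega)] at hb
    simp at hb
  refine ⟨I.core, by simpa using I.hbsize, ?_, ?_, ?_⟩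
  · intro j v hv
    by_cases hj : d = j
    · subst hj
      rw [pvBGet_set_self hd] at hv
      exact I.hkey d v (by rw [hb]; exact List.mem_cons_of_mem _ hv)
    · rw [pvBGet_set_other hj] at hv
      exact I.hkey j v hv
  · intro j hj
    by_cases hjd : d = j
    · subst hjd; omega
    · rw [pvBGet_set_other hjd]; exact I.hempty j hj
  · intro v hv hvS hvlt
    have hmem := I.hmem v hv hvS hvlt
    by_cases hj : d = (pvG dist v).toNat
    · rw [← hj] at hmem ⊢
      rw [pvBGet_set_self hd]
      rw [hb] at hmem
      rcases List.mem_cons.mp hmem with h | h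
      · exact absurd (h ▸ hSu) hvS
      · exact h
    · rw [pvBGet_set_other hj]
      exact hmem

-- mid-relaxation invariant for B's loop body
structure pvMidB (x k u : Int) (d : Nat) (dist : Array Int) (buckets : Array (List Int))
    (S : Int → Prop) : Prop where
  core : pvCore x k dist S
  huv : pvValid u
  hSu : ¬ S u
  hgu : pvG dist u = (d : Int)
  hδ : pvδ x u = d
  hbsize : buckets.size = 100002
  hkey : ∀ j : Nat, ∀ v ∈ buckets.getD j [], pvValid v ∧ pvG dist v ≤ (j : Int) ∧ j ≤ 100001
  hempty : ∀ j : Nat, j < d → buckets.getD j [] = []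
  hmem : ∀ v, pvValid v → ¬ S v → v ≠ u → pvG dist v < pvInit →
    v ∈ buckets.getD (pvG dist v).toNat []

lemma pvRelaxB_update {x k u : Int} {d : Nat} {dist : Array Int} {buckets : Array (List Int)}
    {S : Int → Prop} (M : pvMidB x k u d dist buckets S) (v : Int) (w : Nat) (hw : w ≤ 1)
    (hsh : (w = 1 ∧ (v = u + 1 ∨ v = u - 1)) ∨ (w = 0 ∧ v = 2 * u))
    (hval : pvValid v) (hgt : pvG dist v > (d : Int) + w) :
    pvMidB x k u d (dist.setIfInBounds v.toNat ((d : Int) + w))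
      (buckets.setIfInBounds (d + w) (v :: buckets.getD (d + w) [])) S ∧
    pvG (dist.setIfInBounds v.toNat ((d : Int) + w)) v = (d : Int) + w ∧
    (∀ z, pvG (dist.setIfInBounds v.toNat ((d : Int) + w)) z ≤ pvG dist z) ∧
    2 * pvSum (dist.setIfInBounds v.toNat ((d : Int) + w)) +
      pvBSum (buckets.setIfInBounds (d + w) (v :: buckets.getD (d + w) [])) + 1
      ≤ 2 * pvSum dist + pvBSum buckets := by
  have C := M.core
  have e : pvEdge u v w := ⟨M.huv, hval, by tauto⟩
  have hgt2 : pvG dist v > pvG dist u + (w : Int) := by rw [M.hgu]; exact hgt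
  have hguδ : pvG dist u = (pvδ x u : Int) := by rw [M.hgu, M.hδ]
  have hvS : ¬ S v := fun hSv => C.noguard hSv e hguδ hgt2
  have hvu : v ≠ u := by intro h; rw [h, M.hgu] at hgt; omega
  have hδv : (pvδ x v : Int) ≤ (d : Int) + w := by
    have := pvδ_edge_le C.hxv e
    rw [← M.hδ]
    exact_mod_cast this
  have hvx : v ≠ x := by
    intro h; rw [h, C.hx0] at hgt
    have : (0:Int) ≤ (d : Int) + w := by positivity
    omega
  have hsize : dist.size = 100001 := C.hsize
  have hdb : pvδ x u ≤ 100000 := pvδ_bound C.hxv M.huv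
  have hdd : d ≤ 100000 := M.hδ ▸ hdb
  have hdw : d + w ≤ 100001 := by omega
  have hdwlt : d + w < buckets.size := by rw [M.hbsize]; omega
  have hGv : pvG (dist.setIfInBounds v.toNat ((d : Int) + w)) v = (d : Int) + w :=
    pvG_set_self hsize hval _
  have hGother : ∀ z : Int, z.toNat ≠ v.toNat →
      pvG (dist.setIfInBounds v.toNat ((d : Int) + w)) z = pvG dist z := by
    intro z hz; exact pvG_set_other (fun h => hz h.symm) _
  have hmono : ∀ z, pvG (dist.setIfInBounds v.toNat ((d : Int) + w)) z ≤ pvG dist z := by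
    intro z
    by_cases hz : z.toNat = v.toNat
    · have h1 : pvG (dist.setIfInBounds v.toNat ((d : Int) + w)) z = (d : Int) + w := by
        unfold pvG at *; rw [hz, hGv]
      have h2 : pvG dist z = pvG dist v := by unfold pvG; rw [hz]
      omega
    · rw [hGother z hz]
  have hne_valid : ∀ z : Int, pvValid z → z ≠ v → z.toNat ≠ v.toNat := by
    intro z hz hzv h
    exact hzv (pvToNat_inj hz.1 hval.1 h)
  have hmeas : 2 * pvSum (dist.setIfInBounds v.toNat ((d : Int) + w)) +
      pvBSum (buckets.setIfInBounds (d + w) (v :: buckets.getD (d + w) [])) + 1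
      ≤ 2 * pvSum dist + pvBSum buckets := by
    have h1 : v.toNat < dist.size := by rw [hsize]; unfold pvValid at hval; omega
    have h2 := pvSum_set (dist := dist) (v := v) h1 ((d : Int) + w)
    have h3 : ((d : Int) + w).toNat + 1 ≤ (pvG dist v).toNat := by omega
    have h4 := pvBSum_set (buckets := buckets) (j := d + w) hdwlt (v :: buckets.getD (d + w) [])
    simp only [List.length_cons] at h4
    omega
  refine ⟨?_, hGv, hmono, hmeas⟩
  refine ⟨?_, M.huv, M.hSu, ?_, M.hδ, by simpa using M.hbsize, ?_, ?_, ?_⟩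
  · -- core
    refine ⟨by simp [Array.size_setIfInBounds, hsize], C.hxv, C.hkv, C.hkS, ?_, ?_, ?_, C.hSval, ?_, ?_⟩
    · rw [hGother x (hne_valid x C.hxv (fun h => hvx h.symm))]; exact C.hx0
    · intro z hz
      by_cases h : z = v
      · subst h; rw [hGv]; exact hδv
      · rw [hGother z (hne_valid z hz h)]; exact C.hlow z hz
    · intro z hz
      by_cases h : z = v
      · subst h; rw [hGv]
        unfold pvInit
        omega
      · rw [hGother z (hne_valid z hz h)]; exact C.hub z hz
    · intro s hs
      have : s ≠ v := fun h => hvS (h ▸ hs)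
      rw [hGother s (hne_valid s (C.hSval s hs) this)]; exact C.hSg s hs
    · intro s hs z w' e'
      exact le_trans (hmono z) (C.hrel s hs z w' e')
  · rw [hGother u (hne_valid u M.huv (Ne.symm hvu))]; exact M.hgu
  · -- hkey
    intro j z hz
    by_cases hj : d + w = j
    · subst hj
      rw [pvBGet_set_self hdwlt] at hz
      rcases List.mem_cons.mp hz with h | h
      · subst h
        exact ⟨hval, by rw [hGv]; push_cast; omega, hdw⟩
      · obtain ⟨h1, h2, h3⟩ := M.hkey (d + w) z h
        exact ⟨h1, le_trans (hmono z) h2, h3⟩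
    · rw [pvBGet_set_other hj] at hz
      obtain ⟨h1, h2, h3⟩ := M.hkey j z hz
      exact ⟨h1, le_trans (hmono z) h2, h3⟩
  · -- hempty
    intro j hj
    have : d + w ≠ j := by omega
    rw [pvBGet_set_other this]
    exact M.hempty j hj
  · -- hmem
    intro z hz hzS hzu hzlt
    by_cases h : z = v
    · subst h
      have hGt : (pvG (dist.setIfInBounds z.toNat ((d : Int) + w)) z).toNat = d + w := by
        rw [hGv]; omega
      rw [hGt, pvBGet_set_self hdwlt]
      rw [hGv] at *
      exact List.mem_cons_self
    · rw [hGother z (hne_valid z hz h)] at hzlt ⊢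
      have hmem := M.hmem z hz hzS hzu hzlt
      by_cases hj : d + w = (pvG dist z).toNat
      · rw [← hj, pvBGet_set_self hdwlt]
        rw [← hj] at hmem
        exact List.mem_cons_of_mem _ hmem
      · rw [pvBGet_set_other hj]
        exact hmem

-- settling u in B
lemma pvFinishB {x k u : Int} {d : Nat} {dist3 : Array Int} {B3 : Array (List Int)}
    {S : Int → Prop} (M : pvMidB x k u d dist3 B3 S) (huk : u ≠ k)
    (r1 : pvValid (u + 1) → pvG dist3 (u + 1) ≤ (d : Int) + 1)
    (r2 : pvValid (u - 1) → pvG dist3 (u - 1) ≤ (d : Int) + 1)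
    (r3 : pvValid (2 * u) → pvG dist3 (2 * u) ≤ (d : Int)) :
    pvInvB x k dist3 B3 d (fun z => S z ∨ z = u) := by
  have C := M.core
  have hδd : ((pvδ x u : Int)) = (d : Int) := by rw [M.hδ]
  refine ⟨⟨C.hsize, C.hxv, C.hkv, ?_, C.hx0, C.hlow, C.hub, ?_, ?_, ?_⟩,
    M.hbsize, M.hkey, M.hempty, ?_⟩
  · rintro (h | h); exact C.hkS h; exact huk h.symm
  · rintro s (h | h); exact C.hSval s h; subst h; exact M.huv
  · rintro s (h | h); exact C.hSg s h; subst h; rw [M.hgu, hδd]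
  · rintro s (h | h) z w e
    · exact C.hrel s h z w e
    · subst h
      rw [hδd]
      obtain ⟨_, hv, hshape⟩ := e
      rcases hshape with ⟨hw, hv1⟩ | ⟨hw, hv1⟩
      · subst hw
        rcases hv1 with h | h <;> subst h
        · have := r1 hv; push_cast; exact this
        · have := r2 hv; push_cast; exact this
      · subst hw
        subst hv1
        have := r3 hv; push_cast; exact this
  · intro z hz hzS hzlt
    rw [not_or] at hzS
    exact M.hmem z hz hzS.1 hzS.2 hzlt

lemma pvInvB.toMid {x k : Int} {dist : Array Int} {buckets : Array (List Int)} {d : Nat}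
    {S : Int → Prop} {u : Int} {rest : List Int}
    (I : pvInvB x k dist buckets d S)
    (hb : buckets.getD d [] = u :: rest) (hSu : ¬ S u)
    (hge : ¬ pvG dist u < (d : Int)) :
    pvMidB x k u d dist (buckets.setIfInBounds d rest) S := by
  have hd : d < buckets.size := by
    by_contra h
    rw [pvBGetD_eq, Array.getElem?_eq_none (by omega)] at hb
    simp at hb
  obtain ⟨hvu, hgu, hδ⟩ := I.popExact (by rw [hb]; exact List.mem_cons_self) hge
  refine ⟨I.core, hvu, hSu, hgu, hδ, by simpa using I.hbsize, ?_, ?_, ?_⟩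
  · intro j v hv
    by_cases hj : d = j
    · subst hj
      rw [pvBGet_set_self hd] at hv
      exact I.hkey d v (by rw [hb]; exact List.mem_cons_of_mem _ hv)
    · rw [pvBGet_set_other hj] at hv
      exact I.hkey j v hv
  · intro j hj
    by_cases hjd : d = j
    · omega
    · rw [pvBGet_set_other hjd]; exact I.hempty j hj
  · intro v hv hvS hvu' hvlt
    have hmem := I.hmem v hv hvS hvlt
    by_cases hj : d = (pvG dist v).toNat
    · rw [← hj] at hmem ⊢
      rw [pvBGet_set_self hd]
      rw [hb] at hmem
      rcases List.mem_cons.mp hmem with h | h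
      · exact absurd h hvu'
      · exact h
    · rw [pvBGet_set_other hj]
      exact hmem

lemma pvStepB1 {x k u : Int} {d : Nat} {dist : Array Int} {buckets : Array (List Int)}
    {S : Int → Prop} (M : pvMidB x k u d dist buckets S) :
    ∃ D Bk,
      D = (if u + 1 ≤ 100000 ∧ dist.getD (u+1).toNat 0 > (d : Int) + 1 then
            dist.setIfInBounds (u+1).toNat ((d : Int) + 1) else dist) ∧
      Bk = (if u + 1 ≤ 100000 ∧ dist.getD (u+1).toNat 0 > (d : Int) + 1 then
            buckets.setIfInBounds (d+1) ((u+1) :: buckets.getD (d+1) []) else buckets) ∧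
      pvMidB x k u d D Bk S ∧
      (pvValid (u + 1) → pvG D (u + 1) ≤ (d : Int) + 1) ∧
      (∀ z, pvG D z ≤ pvG dist z) ∧
      (2 * pvSum D + pvBSum Bk ≤ 2 * pvSum dist + pvBSum buckets) := by
  by_cases hc : u + 1 ≤ 100000 ∧ dist.getD (u+1).toNat 0 > (d : Int) + 1
  · have hval : pvValid (u + 1) := ⟨by have := M.huv.1; omega, hc.1⟩
    have h := pvRelaxB_update M (u+1) 1 (by omega) (Or.inl ⟨rfl, Or.inl rfl⟩) hval
      (by push_cast; exact hc.2)
    obtain ⟨M1, g1, mono1, meas1⟩ := h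
    refine ⟨_, _, by rw [if_pos hc], by rw [if_pos hc], ?_, ?_, ?_, ?_⟩
    · have h := M1; simp only [Nat.cast_one] at h; exact h
    · intro _; have h := g1; simp only [Nat.cast_one] at h; exact le_of_eq h
    · intro z; have h := mono1 z; simp only [Nat.cast_one] at h; exact h
    · have h := meas1; simp only [Nat.cast_one] at h; omega
  · refine ⟨_, _, by rw [if_neg hc], by rw [if_neg hc], M, ?_, fun z => le_rfl, le_rfl⟩
    intro hv
    by_contra hgt
    exact hc ⟨hv.2, by show pvG dist (u+1) > _; omega⟩

lemma pvStepB2 {x k u : Int} {d : Nat} {dist : Array Int} {buckets : Array (List Int)}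
    {S : Int → Prop} (M : pvMidB x k u d dist buckets S) :
    ∃ D Bk,
      D = (if 0 ≤ u - 1 ∧ dist.getD (u-1).toNat 0 > (d : Int) + 1 then
            dist.setIfInBounds (u-1).toNat ((d : Int) + 1) else dist) ∧
      Bk = (if 0 ≤ u - 1 ∧ dist.getD (u-1).toNat 0 > (d : Int) + 1 then
            buckets.setIfInBounds (d+1) ((u-1) :: buckets.getD (d+1) []) else buckets) ∧
      pvMidB x k u d D Bk S ∧
      (pvValid (u - 1) → pvG D (u - 1) ≤ (d : Int) + 1) ∧
      (∀ z, pvG D z ≤ pvG dist z) ∧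
      (2 * pvSum D + pvBSum Bk ≤ 2 * pvSum dist + pvBSum buckets) := by
  by_cases hc : 0 ≤ u - 1 ∧ dist.getD (u-1).toNat 0 > (d : Int) + 1
  · have hval : pvValid (u - 1) := ⟨hc.1, by have := M.huv.2; omega⟩
    have h := pvRelaxB_update M (u-1) 1 (by omega) (Or.inl ⟨rfl, Or.inr rfl⟩) hval
      (by push_cast; exact hc.2)
    obtain ⟨M1, g1, mono1, meas1⟩ := h
    refine ⟨_, _, by rw [if_pos hc], by rw [if_pos hc], ?_, ?_, ?_, ?_⟩
    · have h := M1; simp only [Nat.cast_one] at h; exact h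
    · intro _; have h := g1; simp only [Nat.cast_one] at h; exact le_of_eq h
    · intro z; have h := mono1 z; simp only [Nat.cast_one] at h; exact h
    · have h := meas1; simp only [Nat.cast_one] at h; omega
  · refine ⟨_, _, by rw [if_neg hc], by rw [if_neg hc], M, ?_, fun z => le_rfl, le_rfl⟩
    intro hv
    by_contra hgt
    exact hc ⟨hv.1, by show pvG dist (u-1) > _; omega⟩

lemma pvStepB3 {x k u : Int} {d : Nat} {dist : Array Int} {buckets : Array (List Int)}
    {S : Int → Prop} (M : pvMidB x k u d dist buckets S) :
    ∃ D Bk,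
      D = (if 2*u ≤ 100000 ∧ dist.getD (2*u).toNat 0 > (d : Int) then
            dist.setIfInBounds (2*u).toNat ((d : Int)) else dist) ∧
      Bk = (if 2*u ≤ 100000 ∧ dist.getD (2*u).toNat 0 > (d : Int) then
            buckets.setIfInBounds d ((2*u) :: buckets.getD d []) else buckets) ∧
      pvMidB x k u d D Bk S ∧
      (pvValid (2*u) → pvG D (2*u) ≤ (d : Int)) ∧
      (∀ z, pvG D z ≤ pvG dist z) ∧
      (2 * pvSum D + pvBSum Bk ≤ 2 * pvSum dist + pvBSum buckets) := by
  by_cases hc : 2*u ≤ 100000 ∧ dist.getD (2*u).toNat 0 > (d : Int)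
  · have hval : pvValid (2*u) := ⟨by have := M.huv.1; omega, hc.1⟩
    have h := pvRelaxB_update M (2*u) 0 (by omega) (Or.inr ⟨rfl, rfl⟩) hval
      (by push_cast; exact hc.2)
    obtain ⟨M1, g1, mono1, meas1⟩ := h
    refine ⟨_, _, by rw [if_pos hc], by rw [if_pos hc], ?_, ?_, ?_, ?_⟩
    · have h := M1; simp only [Nat.cast_zero, add_zero] at h; exact h
    · intro _; have h := g1; simp only [Nat.cast_zero, add_zero] at h; exact le_of_eq h
    · intro z; have h := mono1 z; simp only [Nat.cast_zero, add_zero] at h; exact h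
    · have h := meas1; simp only [Nat.cast_zero, add_zero] at h; omega
  · refine ⟨_, _, by rw [if_neg hc], by rw [if_neg hc], M, ?_, fun z => le_rfl, le_rfl⟩
    intro hv
    by_contra hgt
    exact hc ⟨hv.2, by show pvG dist (2*u) > _; omega⟩

lemma pvBInner_eq (x k : Int) (d : Nat) :
    ∀ fuel (dist : Array Int) (buckets : Array (List Int)) (S : Int → Prop),
      pvInvB x k dist buckets d S →
      2 * pvSum dist + pvBSum buckets < fuel →
      (∃ dist' buckets' S', pvBInner k d fuel dist buckets = (none, dist', buckets') ∧
         pvInvB x k dist' buckets' (d+1) S' ∧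
         2 * pvSum dist' + pvBSum buckets' ≤ 2 * pvSum dist + pvBSum buckets) ∨
      (∃ dist' buckets', pvBInner k d fuel dist buckets = (some ((pvδ x k : Int)), dist', buckets')) := by
  intro fuel
  induction fuel with
  | zero => intro dist buckets S I hm; omega
  | succ fuel IH =>
    intro dist buckets S I hm
    cases hb : buckets.getD d [] with
    | nil =>
      left
      refine ⟨dist, buckets, S, ?_, ?_, le_rfl⟩
      · simp only [pvBInner, hb]
      · refine ⟨I.core, I.hbsize, I.hkey, ?_, I.hmem⟩
        intro j hj
        by_cases h : j = d
        · subst h; exact hb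
        · exact I.hempty j (by omega)
    | cons u rest =>
      have hd : d < buckets.size := by
        by_contra h
        rw [pvBGetD_eq, Array.getElem?_eq_none (by omega)] at hb
        simp at hb
      have hmeas0 : pvBSum (buckets.setIfInBounds d rest) + 1 = pvBSum buckets := by
        have h := pvBSum_set hd rest
        rw [hb] at h
        simp only [List.length_cons] at h
        omega
      by_cases hlt : dist.getD u.toNat 0 < (d : Int)
      · -- stale entry of an already settled node: skipped
        have hSu := I.staleSettled (by rw [hb]; exact List.mem_cons_self) hlt
        have I1 := I.popBucket hb hSu
        have hred : pvBInner k d (fuel+1) dist buckets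
            = pvBInner k d fuel dist (buckets.setIfInBounds d rest) := by
          simp only [pvBInner, hb, if_pos hlt]
        rcases IH dist (buckets.setIfInBounds d rest) S I1 (by omega) with
          ⟨d', b', S', heq, I', hle⟩ | ⟨d', b', heq⟩
        · exact Or.inl ⟨d', b', S', by rw [hred]; exact heq, I', by omega⟩
        · exact Or.inr ⟨d', b', by rw [hred]; exact heq⟩
      · obtain ⟨hvu, hgu, hδu⟩ := I.popExact (by rw [hb]; exact List.mem_cons_self)
          (by rw [pvG_def] at hlt; exact hlt)
        by_cases huk : u = k
        · -- k is popped with its exact distance: return d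
          right
          refine ⟨dist, buckets.setIfInBounds d rest, ?_⟩
          have : ((pvδ x k : Nat) : Int) = (d : Int) := by
            rw [← huk, hδu]
          simp only [pvBInner, hb, if_neg hlt, if_pos huk, this]
        · by_cases hSu : S u
          · -- settled node popped again: no guard fires
            have C := I.core
            have hguδ : pvG dist u = (pvδ x u : Int) := by rw [hgu, hδu]
            have hc1 : ¬ (u + 1 ≤ 100000 ∧ dist.getD (u+1).toNat 0 > (d : Int) + 1) := by
              rintro ⟨h1, h2⟩
              have e1 : pvEdge u (u+1) 1 := ⟨hvu, ⟨by have := hvu.1; omega, h1⟩, Or.inl ⟨rfl, Or.inl rfl⟩⟩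
              have := C.hrel u hSu (u+1) 1 e1
              rw [hguδ.symm, hgu] at this
              rw [pvG_def] at h2
              push_cast at this
              omega
            have hc2 : ¬ (0 ≤ u - 1 ∧ dist.getD (u-1).toNat 0 > (d : Int) + 1) := by
              rintro ⟨h1, h2⟩
              have e1 : pvEdge u (u-1) 1 := ⟨hvu, ⟨h1, by have := hvu.2; omega⟩, Or.inl ⟨rfl, Or.inr rfl⟩⟩
              have := C.hrel u hSu (u-1) 1 e1
              rw [hguδ.symm, hgu] at this
              rw [pvG_def] at h2
              push_cast at this
              omega
            have hc3 : ¬ (2*u ≤ 100000 ∧ dist.getD (2*u).toNat 0 > (d : Int)) := by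
              rintro ⟨h1, h2⟩
              have e1 : pvEdge u (2*u) 0 := ⟨hvu, ⟨by have := hvu.1; omega, h1⟩, Or.inr ⟨rfl, rfl⟩⟩
              have := C.hrel u hSu (2*u) 0 e1
              rw [hguδ.symm, hgu] at this
              rw [pvG_def] at h2
              push_cast at this
              omega
            have I1 := I.popBucket hb hSu
            have hred : pvBInner k d (fuel+1) dist buckets
                = pvBInner k d fuel dist (buckets.setIfInBounds d rest) := by
              simp only [pvBInner, hb, if_neg hlt, if_neg huk, if_neg hc1, if_neg hc2, if_neg hc3]
            rcases IH dist (buckets.setIfInBounds d rest) S I1 (by omega) with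
              ⟨d', b', S', heq, I', hle⟩ | ⟨d', b', heq⟩
            · exact Or.inl ⟨d', b', S', by rw [hred]; exact heq, I', by omega⟩
            · exact Or.inr ⟨d', b', by rw [hred]; exact heq⟩
          · -- fresh pop: relax the three edges, settle u, recurse
            have M0 := I.toMid hb hSu hlt
            obtain ⟨D1, B1, hD1, hB1, M1, r1, mono1, meas1⟩ := pvStepB1 M0
            obtain ⟨D2, B2, hD2, hB2, M2, r2, mono2, meas2⟩ := pvStepB2 M1
            obtain ⟨D3, B3, hD3, hB3, M3, r3, mono3, meas3⟩ := pvStepB3 M2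
            have Ifin : pvInvB x k D3 B3 d (fun z => S z ∨ z = u) :=
              pvFinishB M3 huk
                (fun hv => le_trans (mono3 _) (le_trans (mono2 _) (r1 hv)))
                (fun hv => le_trans (mono3 _) (r2 hv))
                r3
            have hred : pvBInner k d (fuel+1) dist buckets = pvBInner k d fuel D3 B3 := by
              simp only [pvBInner, hb, if_neg hlt, if_neg huk]
              simp only [apply_ite (f := Prod.fst), apply_ite (f := Prod.snd)]
              rw [← hD1, ← hB1, ← hD2, ← hB2, ← hD3, ← hB3]
            rcases IH D3 B3 _ Ifin (by omega) with
              ⟨d', b', S', heq, I', hle⟩ | ⟨d', b', heq⟩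
            · exact Or.inl ⟨d', b', S', by rw [hred]; exact heq, I', by omega⟩
            · exact Or.inr ⟨d', b', by rw [hred]; exact heq⟩

lemma pvBOuter_eq (x k : Int) :
    ∀ steps d (dist : Array Int) (buckets : Array (List Int)) (S : Int → Prop),
      pvInvB x k dist buckets d S → d + steps = 100002 →
      2 * pvSum dist + pvBSum buckets < pvFuel →
      pvBOuter k steps d dist buckets = (pvδ x k : Int) := by
  intro steps
  induction steps with
  | zero =>
    intro d dist buckets S I hd hm
    exfalso
    obtain ⟨m, hmv, hmS, hmg, _⟩ := I.core.frontier I.core.hkv I.core.hkS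
    have hmem := I.hmem m hmv hmS (by rw [hmg]; exact pvδ_lt_init I.core.hxv hmv)
    have hlt : (pvG dist m).toNat < d := by
      have h1 := pvδ_bound I.core.hxv hmv
      have : (pvG dist m).toNat = pvδ x m := by rw [hmg]; simp
      omega
    rw [I.hempty _ hlt] at hmem
    simp at hmem
  | succ steps IH =>
    intro d dist buckets S I hd hm
    rcases pvBInner_eq x k d pvFuel dist buckets S I hm with
      ⟨d', b', S', heq, I', hle⟩ | ⟨d', b', heq⟩
    · have : pvBOuter k (steps+1) d dist buckets = pvBOuter k steps (d+1) d' b' := by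
        simp only [pvBOuter, heq]
      rw [this]
      exact IH (d+1) d' b' S' I' (by omega) (by omega)
    · simp only [pvBOuter, heq]

lemma pvB0_get (x : Int) (j : Nat) :
    ((Array.replicate 100002 ([] : List Int)).setIfInBounds 0 [x]).getD j []
      = if j = 0 then [x] else [] := by
  by_cases h : j = 0
  · subst h
    rw [pvBGet_set_self (by simp)]
    simp
  · rw [pvBGet_set_other (fun hh => h hh.symm)]
    rw [pvBGetD_eq]
    by_cases hj : j < 100002
    · simp [hj, h]
    · rw [Array.getElem?_eq_none (by simpa using hj)]
      simp [h]

lemma pvBSum_init (x : Int) :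
    pvBSum ((Array.replicate 100002 ([] : List Int)).setIfInBounds 0 [x]) = 1 := by
  have h := pvBSum_set (buckets := Array.replicate 100002 ([] : List Int)) (j := 0)
    (by simp) [x]
  have h2 : pvBSum (Array.replicate 100002 ([] : List Int)) = 0 := by
    unfold pvBSum
    rw [Array.toList_replicate, List.map_replicate, List.sum_replicate]
    simp
  rw [h2] at h
  have h3 : (Array.replicate 100002 ([] : List Int)).getD 0 [] = [] := by
    rw [pvBGetD_eq]
    simp
  rw [h3] at h
  simpa using h

lemma pvInvB_init (x k : Int) (hx : pvValid x) (hk : pvValid k) :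
    pvInvB x k ((Array.replicate 100001 pvInit).setIfInBounds x.toNat 0)
      ((Array.replicate 100002 ([] : List Int)).setIfInBounds 0 [x]) 0 (fun _ => False) := by
  have hg := pvG_init x hx
  have IA := pvInvA_init x k hx hk
  refine ⟨IA.core, by simp, ?_, ?_, ?_⟩
  · intro j v hv
    rw [pvB0_get] at hv
    by_cases h : j = 0
    · rw [if_pos h] at hv
      simp at hv
      have hvx : v = x := by omega
      refine ⟨hvx ▸ hx, ?_, by omega⟩
      rw [hvx, hg x hx, if_pos rfl]
      simp [h]
    · rw [if_neg h] at hv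
      simp at hv
  · intro j hj; omega
  · intro v hv _ hvlt
    rw [hg v hv] at hvlt ⊢
    by_cases h : v = x
    · subst h
      rw [if_pos rfl]
      simp
    · rw [if_neg h] at hvlt
      exfalso
      omega

lemma zero_one_bfs_alt_eq (x k : Int) (hx : pvValid x) (hk : pvValid k) :
    zero_one_bfs_alt x k = (pvδ x k : Int) := by
  unfold zero_one_bfs_alt
  apply pvBOuter_eq x k 100002 0 _ _ (fun _ => False) (pvInvB_init x k hx hk) (by omega)
  have h1 := pvSum_init x
  have h2 := pvFuel_big
  rw [pvBSum_init x]
  omega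


-- ===== VERDICT (by name: the statement is the Claim_ definition above) =====
theorem zero_one_bfs_spec : Claim_equal_zero_one_bfs := by
  intro x k _ hpre
  obtain ⟨h1, h2, h3, h4⟩ := hpre
  show zero_one_bfs x k = zero_one_bfs_alt x k
  rw [zero_one_bfs_eq x k ⟨h1, h2⟩ ⟨h3, h4⟩, zero_one_bfs_alt_eq x k ⟨h1, h2⟩ ⟨h3, h4⟩]
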